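-- pv_equiv track=rewrite | github.com/raul7321/Criptografia | 10_MaquinaEnigma_des.py | rota
-- ===== SOURCE A (Python) =====
-- def rota(Disco,n):
--     if n<0: n = len(Disco)+n
--     for i in range(n):
--         B = [d for d in Disco]
--         C = [Disco[d] for d in Disco]
--         C.insert(0,C.pop(-1))
--         Disco = {b:c for b,c in zip(B,C)}
--     return Disco
-- ===== SOURCE B (Python) =====
-- def rota(Disco, n):
--     if n < 0:
--         n += len(Disco)
--     if n <= 0 or not Disco:
--         return Disco
--     r = n % len(Disco)
--     cut = len(Disco) - r
--     keys = list(Disco)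
--     vals = list(Disco.values())
--     return dict(zip(keys, vals[cut:] + vals[:cut]))
-- ===== Notes on version B (the rewrite author's own statement) =====
-- stated objective: faster
-- what changed: A rotates the value list one position per loop iteration, rebuilding the whole dict n times; B computes the effective shift n mod len once and rebuilds the dict from a single slice-and-concatenate rotation of the value list.
-- outside the precondition, e.g. on rota({}, 2): A raises IndexError, B returns {}
import Mathlib
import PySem

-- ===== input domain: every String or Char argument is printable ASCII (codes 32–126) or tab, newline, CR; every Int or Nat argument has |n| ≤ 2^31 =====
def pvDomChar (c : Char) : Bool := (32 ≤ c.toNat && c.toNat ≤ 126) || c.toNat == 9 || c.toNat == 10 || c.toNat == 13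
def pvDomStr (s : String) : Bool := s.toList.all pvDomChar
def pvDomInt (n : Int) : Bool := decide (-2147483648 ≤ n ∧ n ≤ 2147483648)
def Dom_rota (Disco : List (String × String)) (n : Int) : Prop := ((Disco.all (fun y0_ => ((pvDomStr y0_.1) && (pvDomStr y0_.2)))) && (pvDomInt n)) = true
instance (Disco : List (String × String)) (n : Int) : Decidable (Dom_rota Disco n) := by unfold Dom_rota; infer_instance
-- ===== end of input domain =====

-- B replaces A's n successive one-step rotations of the dict's values by a single
-- slice rotation by n mod len (asymptotically faster, as measured by the check).

-- ===== PORT A =====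
-- One iteration of A's loop body: B = keys, C = values, C.insert(0, C.pop(-1)),
-- then the dict comprehension {b:c for b,c in zip(B,C)} (ported as Dict.ofList of
-- the zip, Python's dict construction). pop(-1) on an empty list is Python's
-- IndexError; the `none` branch is only a totalizing guard (excluded by Pre_).
def rotaStep (d : List (String × String)) : List (String × String) :=
  let B := d.map Prod.fst
  let C := d.map Prod.snd
  match PySem.List.pop? C (-1) with
  | none => d
  | some (x, C') => (PySem.Dict.ofList (List.zip B (PySem.List.insert C' 0 x))).items

def rota (Disco : List (String × String)) (n : Int) : List (String × String) :=
  let n' := if n < 0 then (Disco.length : Int) + n else n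
  (PySem.List.pyRange 0 n' 1).foldl (fun d _ => rotaStep d) Disco

-- ===== PORT B =====
def rota_alt (Disco : List (String × String)) (n : Int) : List (String × String) :=
  let n' := if n < 0 then n + (Disco.length : Int) else n
  if n' ≤ 0 ∨ Disco = [] then Disco
  else
    let r := PySem.Int.mod n' (Disco.length : Int)
    let cut := (Disco.length : Int) - r
    let keys := Disco.map Prod.fst
    let vals := Disco.map Prod.snd
    (PySem.Dict.ofList (List.zip keys
      (PySem.List.slice vals (some cut) none ++ PySem.List.slice vals none (some cut)))).items

-- ===== PRECONDITION & SPEC =====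
-- Pre_ excludes (a) association lists with duplicate keys — A's parameter is a
-- Python dict, whose item list never repeats a key (duplicates are collapsed by
-- dict construction before A runs), and (b) the empty dict with positive n, on
-- which A raises IndexError (C.pop(-1) on an empty list).
def Pre_rota (Disco : List (String × String)) (n : Int) : Prop :=
  (Disco.map Prod.fst).Nodup ∧ (Disco = [] → n ≤ 0)
instance (Disco : List (String × String)) (n : Int) : Decidable (Pre_rota Disco n) := by
  unfold Pre_rota; infer_instance

def pvWitness_rota : (List (String × String)) × Int := ([("a", "x"), ("b", "y"), ("c", "z")], 4)

def Spec_rota (Disco : List (String × String)) (n : Int) (out : List (String × String)) : Prop := out = rota_alt Disco n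
instance (Disco : List (String × String)) (n : Int) (out : List (String × String)) : Decidable (Spec_rota Disco n out) := by unfold Spec_rota; infer_instance

-- ===== CLAIM (what is proved, stated in full; the proofs are below) =====
def Claim_equal_rota : Prop := ∀ (Disco : List (String × String)) (n : Int), Dom_rota Disco n → Pre_rota Disco n → Spec_rota Disco n (rota Disco n)

-- ===== LEMMAS AND PROOFS =====

-- zip of the key and value columns is the item list itself
theorem pvZipFstSnd {α β : Type} (l : List (α × β)) :
    List.zip (l.map Prod.fst) (l.map Prod.snd) = l := by
  induction l with
  | nil => rfl
  | cons h t ih => simp [List.zip_cons_cons, ih]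

-- dict(zip(B, C)) has item list zip B C when the keys B are distinct
theorem pvItemsOfZip (B C : List String) (hlen : B.length = C.length) (hB : B.Nodup) :
    (PySem.Dict.ofList (List.zip B C)).items = List.zip B C := by
  have h := PySem.Dict.items_foldl_insert_fresh (List.zip B C) Prod.fst Prod.snd
      (PySem.Dict.empty) (fun a _ => PySem.Dict.contains_empty a.1)
      (by rw [List.map_fst_zip (le_of_eq hlen)]; exact hB)
  simpa using h

-- a foldl that ignores the element is function iteration
theorem pvFoldlConst {α β : Type} (f : α → α) (l : List β) (a : α) :
    l.foldl (fun x _ => f x) a = f^[l.length] a := by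
  induction l generalizing a with
  | nil => rfl
  | cons h t ih => simpa [Function.iterate_succ_apply] using ih (f a)

-- one loop iteration of A rotates the value column right by one position
theorem pvStepZip (B C : List String) (hlen : B.length = C.length) (hB : B.Nodup)
    (hC : C ≠ []) :
    rotaStep (List.zip B C) = List.zip B (C.rotate (C.length - 1)) := by
  obtain ⟨C0, x, rfl⟩ : ∃ C0 x, C = C0 ++ [x] :=
    ⟨C.dropLast, C.getLast hC, (List.dropLast_append_getLast hC).symm⟩
  unfold rotaStep
  dsimp only
  rw [List.map_snd_zip (le_of_eq hlen.symm), List.map_fst_zip (le_of_eq hlen)]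
  simp only [PySem.List.pop?_last, PySem.List.insert_zero]
  rw [pvItemsOfZip B (x :: C0) (by simp at hlen ⊢; omega) hB]
  have hlen1 : (C0 ++ [x]).length - 1 = C0.length := by simp
  rw [List.rotate_eq_drop_append_take (by simp), hlen1, List.drop_left, List.take_left]
  rfl

-- k loop iterations of A rotate the value column right by k positions
theorem pvIterZip (k : Nat) (B C : List String) (hlen : B.length = C.length)
    (hB : B.Nodup) (hC : C ≠ []) :
    rotaStep^[k] (List.zip B C) = List.zip B (C.rotate (k * (C.length - 1))) := by
  induction k with
  | zero => simp
  | succ k ih =>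
    rw [Function.iterate_succ_apply', ih,
        pvStepZip B (C.rotate (k * (C.length - 1)))
          (by simpa using hlen) hB (by simpa using hC),
        List.rotate_rotate]
    have h2 : k * (C.length - 1) + ((C.rotate (k * (C.length - 1))).length - 1)
        = (k + 1) * (C.length - 1) := by
      rw [List.length_rotate, Nat.succ_mul]
    rw [h2]

-- right rotation by k equals left rotation by len - k % len
theorem pvRotMod (C : List String) (k : Nat) (hC : C ≠ []) :
    C.rotate (k * (C.length - 1)) = C.rotate (C.length - k % C.length) := by
  have hl : 0 < C.length := List.length_pos_iff.mpr hC
  rw [← List.rotate_mod, ← List.rotate_mod C (C.length - k % C.length)]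
  congr 1
  have hm : k % C.length < C.length := Nat.mod_lt _ hl
  have h1 : Nat.ModEq C.length (k * (C.length - 1)) ((k % C.length) * (C.length - 1)) :=
    ((Nat.mod_modEq k C.length).symm).mul_right _
  have h3 : Nat.ModEq C.length ((k % C.length) * C.length) C.length := by
    have a1 : (C.length : Nat) ∣ (k % C.length) * C.length := dvd_mul_left _ _
    have a2 : (C.length : Nat) ∣ C.length := dvd_refl _
    exact (Nat.modEq_zero_iff_dvd.mpr a1).trans (Nat.modEq_zero_iff_dvd.mpr a2).symm
  have h2 : Nat.ModEq C.length ((k % C.length) * (C.length - 1)) (C.length - k % C.length) := by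
    apply Nat.ModEq.add_right_cancel' (k % C.length)
    have e1 : (k % C.length) * (C.length - 1) + (k % C.length) = (k % C.length) * C.length := by
      rw [← Nat.mul_succ]; congr 1; omega
    have e2 : (C.length - k % C.length) + (k % C.length) = C.length := by omega
    rw [e1, e2]; exact h3
  exact h1.trans h2

-- ===== VERDICT (by name: the statement is the Claim_ definition above) =====
theorem rota_spec : Claim_equal_rota := by
  intro Disco n _ hPre
  unfold Spec_rota rota rota_alt
  dsimp only
  obtain ⟨hB, hEmp⟩ := hPre
  by_cases hn : (if n < 0 then (Disco.length : Int) + n else n) ≤ 0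
  · have hn' : (if n < 0 then n + (Disco.length : Int) else n) ≤ 0 := by
      split at hn <;> split <;> omega
    rw [PySem.List.pyRange_one_eq_nil hn]
    simp only [List.foldl_nil]
    rw [if_pos (Or.inl hn')]
  · -- the loop runs; the dict is nonempty
    rw [not_le] at hn
    have hD : Disco ≠ [] := by
      intro h
      have h0 := hEmp h
      subst h
      simp only [List.length_nil, Nat.cast_zero, zero_add] at hn
      split at hn <;> omega
    have hl : 0 < Disco.length := List.length_pos_iff.mpr hD
    have hnB : ¬ ((if n < 0 then n + (Disco.length : Int) else n) ≤ 0 ∨ Disco = []) := by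
      rw [not_or, not_le]
      constructor
      · split at hn <;> split <;> omega
      · exact hD
    rw [if_neg hnB]
    set n' := if n < 0 then (Disco.length : Int) + n else n with hn'def
    have hcomm : (if n < 0 then n + (Disco.length : Int) else n) = n' := by
      rw [hn'def]; split <;> ring
    rw [hcomm]
    set k : Nat := n'.toNat with hk
    set B := Disco.map Prod.fst with hBdef
    set C := Disco.map Prod.snd with hCdef
    have hlen : B.length = C.length := by simp [hBdef, hCdef]
    have hC : C ≠ [] := by simp [hCdef, hD]
    have hCL : C.length = Disco.length := by simp [hCdef]
    have hzip : List.zip B C = Disco := pvZipFstSnd Disco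
    have hm : k % Disco.length < Disco.length := Nat.mod_lt _ hl
    -- A's side: k one-step rotations of the value column
    have hA : (PySem.List.pyRange 0 n' 1).foldl (fun d _ => rotaStep d) Disco
        = List.zip B (C.rotate (C.length - k % C.length)) := by
      rw [pvFoldlConst rotaStep (PySem.List.pyRange 0 n' 1) Disco,
          PySem.List.length_pyRange_one]
      have hkk : (n' - 0).toNat = k := by omega
      rw [hkk, ← hzip, pvIterZip k B C hlen hB hC, pvRotMod C k hC]
    rw [hA]
    -- B's side: a single slice rotation of the value column
    have hr : PySem.Int.mod n' (Disco.length : Int) = ((k % Disco.length : Nat) : Int) := by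
      rw [PySem.Int.mod_eq_emod_of_pos (by exact_mod_cast hl)]
      have hnk : n' = (k : Int) := by omega
      rw [hnk]
      push_cast
      rfl
    rw [hr]
    have hcut : (Disco.length : Int) - ((k % Disco.length : Nat) : Int)
        = ((Disco.length - k % Disco.length : Nat) : Int) := by
      push_cast
      omega
    rw [hcut,
        PySem.List.slice_from C (Int.natCast_nonneg _),
        PySem.List.slice_to C (Int.natCast_nonneg _)]
    simp only [Int.toNat_natCast]
    rw [← List.rotate_eq_drop_append_take (by omega), hCL,
        pvItemsOfZip B (C.rotate (Disco.length - k % Disco.length))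
          (by simp [hlen, hCL]) hB]
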